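-- pv_equiv track=rewrite | github.com/goodoleusa/faerie-vault-bkp | scripts/8x_time_estimate_analyzer.py | _extract_task_category
-- ===== SOURCE A (Python) =====
-- def _extract_task_category(task_id: str) -> str:
--     """Extract task category from task_id prefix."""
--     prefixes = {
--         'audit': ['audit-', 'validate-', 'review-', 'qa-'],
--         'design': ['design-', 'plan-', 'spec-', 'architecture-'],
--         'implementation': ['impl-', 'build-', 'code-', 'fix-'],
--         'synthesis': ['synthesis-', 'weave-', 'document-', 'narrative-'],
--         'discovery': ['discovery-', 'scan-', 'frontier-'],
--     }
--
--     task_id_lower = task_id.lower()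
--     for category, prefixes_list in prefixes.items():
--         for prefix in prefixes_list:
--             if task_id_lower.startswith(prefix):
--                 return category
--
--     return 'other'
-- ===== SOURCE B (Python) =====
-- _CATEGORY_BY_TOKEN = {
--     'audit': 'audit', 'validate': 'audit', 'review': 'audit', 'qa': 'audit',
--     'design': 'design', 'plan': 'design', 'spec': 'design', 'architecture': 'design',
--     'impl': 'implementation', 'build': 'implementation', 'code': 'implementation', 'fix': 'implementation',
--     'synthesis': 'synthesis', 'weave': 'synthesis', 'document': 'synthesis', 'narrative': 'synthesis',
--     'discovery': 'discovery', 'scan': 'discovery', 'frontier': 'discovery',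
-- }
--
-- def _extract_task_category(task_id: str) -> str:
--     """Extract task category from task_id prefix."""
--     token, sep, _ = task_id.lower().partition('-')
--     if not sep:
--         return 'other'
--     return _CATEGORY_BY_TOKEN.get(token, 'other')
-- ===== Notes on version B (the rewrite author's own statement) =====
-- stated objective: simpler
-- what changed: Instead of scanning all 19 category prefixes with startswith, B partitions the lowercased task_id at its first '-' and looks the head token up in one flat token-to-category dict.
import Mathlib
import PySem

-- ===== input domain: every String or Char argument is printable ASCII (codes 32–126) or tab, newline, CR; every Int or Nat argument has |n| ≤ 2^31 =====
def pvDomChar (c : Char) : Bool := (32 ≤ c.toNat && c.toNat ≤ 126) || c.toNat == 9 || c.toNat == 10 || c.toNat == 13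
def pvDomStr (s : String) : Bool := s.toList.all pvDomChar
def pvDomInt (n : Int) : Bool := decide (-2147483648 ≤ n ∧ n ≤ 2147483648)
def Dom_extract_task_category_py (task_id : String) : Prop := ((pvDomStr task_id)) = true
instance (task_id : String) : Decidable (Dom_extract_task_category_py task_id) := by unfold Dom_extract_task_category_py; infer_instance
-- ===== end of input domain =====

-- B replaces A's scan over 19 category prefixes by one partition at the first '-' and a single
-- association-table lookup of the head token (objective: simpler).


-- ===== PORT A =====
-- A's literal dict of category → prefix strings (strings carried as char lists, the PySem string side)
def pvPrefixesA : List (String × List (List Char)) :=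
  [("audit", ["audit-".toList, "validate-".toList, "review-".toList, "qa-".toList]),
   ("design", ["design-".toList, "plan-".toList, "spec-".toList, "architecture-".toList]),
   ("implementation", ["impl-".toList, "build-".toList, "code-".toList, "fix-".toList]),
   ("synthesis", ["synthesis-".toList, "weave-".toList, "document-".toList, "narrative-".toList]),
   ("discovery", ["discovery-".toList, "scan-".toList, "frontier-".toList])]

-- inner loop: 'for prefix in prefixes_list: if task_id_lower.startswith(prefix): return category'
def pvAnyPrefixA (t : List Char) : List (List Char) → Bool
  | [] => false
  | p :: ps => if PySem.Chars.startswith t p then true else pvAnyPrefixA t ps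

-- outer loop: 'for category, prefixes_list in prefixes.items(): …; return "other"'
def pvLoopA (t : List Char) : List (String × List (List Char)) → String
  | [] => "other"
  | (cat, ps) :: rest => if pvAnyPrefixA t ps then cat else pvLoopA t rest

def extract_task_category_py (task_id : String) : String :=
  pvLoopA (PySem.Str.lower task_id).toList pvPrefixesA

-- ===== PORT B =====
-- B's flat dict token → category (distinct literal keys, so first-match lookup = dict.get)
def pvCatTableB : List (List Char × String) :=
  [("audit".toList, "audit"), ("validate".toList, "audit"), ("review".toList, "audit"), ("qa".toList, "audit"),
   ("design".toList, "design"), ("plan".toList, "design"), ("spec".toList, "design"), ("architecture".toList, "design"),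
   ("impl".toList, "implementation"), ("build".toList, "implementation"), ("code".toList, "implementation"), ("fix".toList, "implementation"),
   ("synthesis".toList, "synthesis"), ("weave".toList, "synthesis"), ("document".toList, "synthesis"), ("narrative".toList, "synthesis"),
   ("discovery".toList, "discovery"), ("scan".toList, "discovery"), ("frontier".toList, "discovery")]

-- _CATEGORY_BY_TOKEN.get(token, 'other')
def pvLookupB (t : List Char) : List (List Char × String) → String
  | [] => "other"
  | (k, v) :: rest => if t = k then v else pvLookupB t rest

def extract_task_category_py_alt (task_id : String) : String :=
  -- token, sep, _ = task_id.lower().partition('-'): token = chars before the first '-',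
  -- sep is empty exactly when dropWhile (≠ '-') is empty
  let l := (PySem.Str.lower task_id).toList
  if l.dropWhile (fun c => c != '-') = [] then "other"
  else pvLookupB (l.takeWhile (fun c => c != '-')) pvCatTableB

-- ===== PRECONDITION & SPEC =====
def Spec_extract_task_category_py (task_id : String) (out : String) : Prop := out = extract_task_category_py_alt task_id
instance (task_id : String) (out : String) : Decidable (Spec_extract_task_category_py task_id out) := by unfold Spec_extract_task_category_py; infer_instance

-- ===== CLAIM (what is proved, stated in full; the proofs are below) =====
def Claim_equal_extract_task_category_py : Prop := ∀ (task_id : String), Dom_extract_task_category_py task_id → Spec_extract_task_category_py task_id (extract_task_category_py task_id)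

-- ===== LEMMAS AND PROOFS =====

-- a prefix containing '-' never matches a dash-free string
lemma pv_startswith_no_dash (l p : List Char) (hl : ('-' : Char) ∉ l) (hp : ('-' : Char) ∈ p) :
    PySem.Chars.startswith l p = false := by
  rw [Bool.eq_false_iff, ne_eq, PySem.Chars.startswith_iff]
  intro h
  exact hl (h.subset hp)

-- 'l startswith w ++ "-"' on l = t ++ '-' :: r with t, w dash-free means exactly t = w
lemma pv_startswith_split (w t r : List Char) (hw : ('-' : Char) ∉ w) (ht : ('-' : Char) ∉ t) :
    PySem.Chars.startswith (t ++ '-' :: r) (w ++ ['-']) = decide (t = w) := by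
  induction w generalizing t with
  | nil =>
    cases t with
    | nil => simp [PySem.Chars.startswith_iff]
    | cons c t' =>
      have hc : c ≠ '-' := fun h => ht (h ▸ List.mem_cons_self)
      rw [show decide (c :: t' = ([] : List Char)) = false from by simp,
        Bool.eq_false_iff, ne_eq, PySem.Chars.startswith_iff, List.nil_append, List.cons_append]
      intro h
      exact hc (List.cons_prefix_cons.mp h).1.symm
  | cons a w' ih =>
    have ha : a ≠ '-' := fun h => hw (h ▸ List.mem_cons_self)
    have hw' : ('-' : Char) ∉ w' := fun h => hw (List.mem_cons_of_mem _ h)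
    cases t with
    | nil =>
      rw [show decide (([] : List Char) = a :: w') = false from by simp,
        Bool.eq_false_iff, ne_eq, PySem.Chars.startswith_iff, List.nil_append, List.cons_append]
      intro h
      exact ha (List.cons_prefix_cons.mp h).1
    | cons c t' =>
      have ht' : ('-' : Char) ∉ t' := fun h => ht (List.mem_cons_of_mem _ h)
      have hrec := ih t' hw' ht'
      rw [Bool.eq_iff_iff] at hrec ⊢
      rw [PySem.Chars.startswith_iff] at hrec ⊢
      simp only [List.cons_append, List.cons_prefix_cons, hrec, decide_eq_true_eq,
        List.cons.injEq]
      constructor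
      · rintro ⟨h1, h2⟩; exact ⟨h1.symm, h2⟩
      · rintro ⟨h1, h2⟩; exact ⟨h1.symm, h2⟩

-- with a dash present, A's 19-prefix scan on t ++ '-' :: r is B's table lookup of t
set_option maxHeartbeats 1000000 in
lemma pv_chain (t r : List Char) (ht : ('-' : Char) ∉ t) :
    pvLoopA (t ++ '-' :: r) pvPrefixesA = pvLookupB t pvCatTableB := by
  simp only [pvLoopA, pvAnyPrefixA, pvPrefixesA, pvLookupB, pvCatTableB]
  rw [show ("audit-".toList) = "audit".toList ++ ['-'] from rfl,
      show ("validate-".toList) = "validate".toList ++ ['-'] from rfl,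
      show ("review-".toList) = "review".toList ++ ['-'] from rfl,
      show ("qa-".toList) = "qa".toList ++ ['-'] from rfl,
      show ("design-".toList) = "design".toList ++ ['-'] from rfl,
      show ("plan-".toList) = "plan".toList ++ ['-'] from rfl,
      show ("spec-".toList) = "spec".toList ++ ['-'] from rfl,
      show ("architecture-".toList) = "architecture".toList ++ ['-'] from rfl,
      show ("impl-".toList) = "impl".toList ++ ['-'] from rfl,
      show ("build-".toList) = "build".toList ++ ['-'] from rfl,
      show ("code-".toList) = "code".toList ++ ['-'] from rfl,
      show ("fix-".toList) = "fix".toList ++ ['-'] from rfl,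
      show ("synthesis-".toList) = "synthesis".toList ++ ['-'] from rfl,
      show ("weave-".toList) = "weave".toList ++ ['-'] from rfl,
      show ("document-".toList) = "document".toList ++ ['-'] from rfl,
      show ("narrative-".toList) = "narrative".toList ++ ['-'] from rfl,
      show ("discovery-".toList) = "discovery".toList ++ ['-'] from rfl,
      show ("scan-".toList) = "scan".toList ++ ['-'] from rfl,
      show ("frontier-".toList) = "frontier".toList ++ ['-'] from rfl,
      pv_startswith_split "audit".toList t r (by decide) ht,
      pv_startswith_split "validate".toList t r (by decide) ht,
      pv_startswith_split "review".toList t r (by decide) ht,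
      pv_startswith_split "qa".toList t r (by decide) ht,
      pv_startswith_split "design".toList t r (by decide) ht,
      pv_startswith_split "plan".toList t r (by decide) ht,
      pv_startswith_split "spec".toList t r (by decide) ht,
      pv_startswith_split "architecture".toList t r (by decide) ht,
      pv_startswith_split "impl".toList t r (by decide) ht,
      pv_startswith_split "build".toList t r (by decide) ht,
      pv_startswith_split "code".toList t r (by decide) ht,
      pv_startswith_split "fix".toList t r (by decide) ht,
      pv_startswith_split "synthesis".toList t r (by decide) ht,
      pv_startswith_split "weave".toList t r (by decide) ht,
      pv_startswith_split "document".toList t r (by decide) ht,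
      pv_startswith_split "narrative".toList t r (by decide) ht,
      pv_startswith_split "discovery".toList t r (by decide) ht,
      pv_startswith_split "scan".toList t r (by decide) ht,
      pv_startswith_split "frontier".toList t r (by decide) ht]
  simp only [decide_eq_true_eq]
  by_cases h1 : t = ['a', 'u', 'd', 'i', 't']
  · rw [h1]; decide
  ·
    by_cases h2 : t = ['v', 'a', 'l', 'i', 'd', 'a', 't', 'e']
    · rw [h2]; decide
    ·
      by_cases h3 : t = ['r', 'e', 'v', 'i', 'e', 'w']
      · rw [h3]; decide
      ·
        by_cases h4 : t = ['q', 'a']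
        · rw [h4]; decide
        ·
          by_cases h5 : t = ['d', 'e', 's', 'i', 'g', 'n']
          · rw [h5]; decide
          ·
            by_cases h6 : t = ['p', 'l', 'a', 'n']
            · rw [h6]; decide
            ·
              by_cases h7 : t = ['s', 'p', 'e', 'c']
              · rw [h7]; decide
              ·
                by_cases h8 : t = ['a', 'r', 'c', 'h', 'i', 't', 'e', 'c', 't', 'u', 'r', 'e']
                · rw [h8]; decide
                ·
                  by_cases h9 : t = ['i', 'm', 'p', 'l']
                  · rw [h9]; decide
                  ·
                    by_cases h10 : t = ['b', 'u', 'i', 'l', 'd']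
                    · rw [h10]; decide
                    ·
                      by_cases h11 : t = ['c', 'o', 'd', 'e']
                      · rw [h11]; decide
                      ·
                        by_cases h12 : t = ['f', 'i', 'x']
                        · rw [h12]; decide
                        ·
                          by_cases h13 : t = ['s', 'y', 'n', 't', 'h', 'e', 's', 'i', 's']
                          · rw [h13]; decide
                          ·
                            by_cases h14 : t = ['w', 'e', 'a', 'v', 'e']
                            · rw [h14]; decide
                            ·
                              by_cases h15 : t = ['d', 'o', 'c', 'u', 'm', 'e', 'n', 't']
                              · rw [h15]; decide
                              ·
                                by_cases h16 : t = ['n', 'a', 'r', 'r', 'a', 't', 'i', 'v', 'e']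
                                · rw [h16]; decide
                                ·
                                  by_cases h17 : t = ['d', 'i', 's', 'c', 'o', 'v', 'e', 'r', 'y']
                                  · rw [h17]; decide
                                  ·
                                    by_cases h18 : t = ['s', 'c', 'a', 'n']
                                    · rw [h18]; decide
                                    ·
                                      by_cases h19 : t = ['f', 'r', 'o', 'n', 't', 'i', 'e', 'r']
                                      · rw [h19]; decide
                                      ·
                                        simp [h1, h2, h3, h4, h5, h6, h7, h8, h9, h10, h11, h12, h13, h14, h15, h16, h17, h18, h19]

-- the list-level equivalence: A's prefix scan equals B's partition-and-lookup, for every char list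
lemma pv_main (l : List Char) :
    pvLoopA l pvPrefixesA =
      (if l.dropWhile (fun c => c != '-') = [] then "other"
       else pvLookupB (l.takeWhile (fun c => c != '-')) pvCatTableB) := by
  by_cases hd : l.dropWhile (fun c => c != '-') = []
  · -- no dash in l: every prefix test of A fails
    have hl : ('-' : Char) ∉ l := by
      intro hm
      have := List.dropWhile_eq_nil_iff.mp hd
      simpa using this _ hm
    have hfalse : ∀ p : List Char, ('-' : Char) ∈ p → PySem.Chars.startswith l p = false :=
      fun p hp => pv_startswith_no_dash l p hl hp
    rw [if_pos hd]
    simp [pvLoopA, pvAnyPrefixA, pvPrefixesA, hfalse]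
  · -- a dash exists: l = takeWhile ++ '-' :: tail of dropWhile
    have h1 : l.takeWhile (fun c => c != '-') ++ l.dropWhile (fun c => c != '-') = l :=
      List.takeWhile_append_dropWhile
    have ht : ('-' : Char) ∉ l.takeWhile (fun c => c != '-') := by
      intro hm
      have := List.mem_takeWhile_imp hm
      simp at this
    have h2 : l.dropWhile (fun c => c != '-') = '-' :: (l.dropWhile (fun c => c != '-')).tail := by
      cases hdw : l.dropWhile (fun c => c != '-') with
      | nil => exact absurd hdw hd
      | cons c r' =>
        have hhd := List.head_dropWhile_not (p := fun c => c != '-') (l := l) (by simp [hdw])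
        simp only [hdw, List.head_cons, bne_eq_false_iff_eq] at hhd
        simp [hhd]
    rw [if_neg hd]
    conv_lhs => rw [← h1, h2]
    exact pv_chain _ _ ht

-- ===== VERDICT (by name: the statement is the Claim_ definition above) =====
theorem extract_task_category_py_spec : Claim_equal_extract_task_category_py := by
  intro task_id _
  unfold Spec_extract_task_category_py extract_task_category_py extract_task_category_py_alt
  exact pv_main _
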